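-- pv_equiv track=rewrite | github.com/Dinoosawruss/advent-of-code-22 | 3-rucksack_reorganization/rucksack_reorganization_1.py | split_groups
-- ===== SOURCE A (Python) =====
-- def split_rucksacks(inp: str) -> list:
--     """Split the raw input string into a list of rucksacks
--
--     Args:
--         inp (str): The raw input string
--
--     Returns:
--         list: A list of rucksacks as strings
--     """
--     return inp.split("\n")
--
-- def split_groups(rucksack_raw: str) -> list:
--     """Split the raw input into groups of 3
--
--     Args:
--         rucksack_raw (str): The raw rucksack input
--
--     Returns:
--         list: Each group of 3 rucksacks
--     """
--     outp: list = []
--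
--     rucksacks: list = split_rucksacks(rucksack_raw)
--
--     for i in range(len(rucksacks)//3):
--         index: int = i*3
--
--         outp.append([
--             rucksacks[index],
--             rucksacks[index + 1],
--             rucksacks[index + 2]
--         ])
--
--     return outp
-- ===== SOURCE B (Python) =====
-- def split_groups(rucksack_raw: str) -> list:
--     """Single pass over the raw characters: build each line as it is read and
--     flush every third completed line into the output, never materialising the
--     full line list and never indexing."""
--     outp = []
--     group = []
--     line_chars = []
--     for ch in rucksack_raw:
--         if ch == "\n":
--             group.append("".join(line_chars))
--             line_chars = []
--             if len(group) == 3: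
--                 outp.append(group)
--                 group = []
--         else:
--             line_chars.append(ch)
--     group.append("".join(line_chars))
--     if len(group) == 3:
--         outp.append(group)
--     return outp
-- ===== Notes on version B (the rewrite author's own statement) =====
-- stated objective: alternative
-- what changed: Replaces A's two-stage split-into-lines-then-index-by-range(len//3) approach with a single character-level pass: a state machine accumulates the current line and the current group of lines, flushing every third completed line to the output, with no line list and no indexing.
import Mathlib
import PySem

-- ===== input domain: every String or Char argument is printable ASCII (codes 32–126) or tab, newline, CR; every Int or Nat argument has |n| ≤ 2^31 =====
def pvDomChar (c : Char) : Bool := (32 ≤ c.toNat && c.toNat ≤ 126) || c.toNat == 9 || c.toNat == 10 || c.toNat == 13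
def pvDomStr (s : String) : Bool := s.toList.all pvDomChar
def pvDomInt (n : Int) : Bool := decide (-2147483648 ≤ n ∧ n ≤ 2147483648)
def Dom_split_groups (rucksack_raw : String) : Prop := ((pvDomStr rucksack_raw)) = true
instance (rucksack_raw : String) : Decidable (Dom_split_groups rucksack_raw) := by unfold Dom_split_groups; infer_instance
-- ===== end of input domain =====

-- B replaces A's split-into-lines + range(len//3) indexing with one character-level
-- pass that accumulates the current line and current group, flushing every third
-- completed line (objective: alternative).

-- ===== PORT A =====
-- inp.split("\n"): the separator is the nonempty literal "\n", so split? is always some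
def split_rucksacks (inp : String) : List String :=
  (PySem.Str.split? inp "\n").getD []

def split_groups (rucksack_raw : String) : List (List String) :=
  let rucksacks : List String := split_rucksacks rucksack_raw
  (PySem.List.pyRange 0 (PySem.Int.floordiv (rucksacks.length : Int) 3) 1).foldl
    (fun outp i =>
      let index : Int := i * 3
      outp ++ [[PySem.List.pyGetD rucksacks index "",
                PySem.List.pyGetD rucksacks (index + 1) "",
                PySem.List.pyGetD rucksacks (index + 2) ""]]) []

-- ===== PORT B =====
-- the single-pass state machine of Source B: state = (output, current group, current line chars);
-- ''.join(line_chars) is ported as String.ofList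
def bGo : List Char → List (List String) → List String → List Char → List (List String)
  | [], outp, group, line =>
      let group' := group ++ [String.ofList line]
      if group'.length == 3 then outp ++ [group'] else outp
  | c :: cs, outp, group, line =>
      if c == '\n' then
        let group' := group ++ [String.ofList line]
        if group'.length == 3 then bGo cs (outp ++ [group']) [] []
        else bGo cs outp group' []
      else bGo cs outp group (line ++ [c])

def split_groups_alt (rucksack_raw : String) : List (List String) :=
  bGo rucksack_raw.toList [] [] []

-- ===== PRECONDITION & SPEC =====
def Spec_split_groups (rucksack_raw : String) (out : List (List String)) : Prop := out = split_groups_alt rucksack_raw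
instance (rucksack_raw : String) (out : List (List String)) : Decidable (Spec_split_groups rucksack_raw out) := by unfold Spec_split_groups; infer_instance

-- ===== CLAIM (what is proved, stated in full; the proofs are below) =====
def Claim_equal_split_groups : Prop := ∀ (rucksack_raw : String), Dom_split_groups rucksack_raw → Spec_split_groups rucksack_raw (split_groups rucksack_raw)

-- ===== LEMMAS AND PROOFS =====

-- the list of lines of a character stream, split at '\n' (specification of split("\n"))
def prependHeadC (p : List Char) : List (List Char) → List (List Char)
  | [] => [p]
  | l :: ls => (p ++ l) :: ls

def linesC : List Char → List (List Char)
  | [] => [[]]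
  | c :: cs => if c = '\n' then [] :: linesC cs else prependHeadC [c] (linesC cs)

-- B's grouping, described on a finished line list
def consume : List String → List String → List (List String)
  | _, [] => []
  | group, l :: rest =>
      let g' := group ++ [l]
      if g'.length == 3 then g' :: consume [] rest else consume g' rest

-- A's grouping, described on a finished line list
def zip3Chunks : List String → List (List String)
  | a :: b :: c :: rest => [a, b, c] :: zip3Chunks rest
  | _ => []

lemma linesC_ne_nil (cs : List Char) : linesC cs ≠ [] := by
  cases cs with
  | nil => simp [linesC]
  | cons c cs =>
      simp only [linesC]
      split
      · simp
      · cases h : linesC cs <;> simp [prependHeadC]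

lemma prependHeadC_append (a b : List Char) (ls : List (List Char)) :
    prependHeadC (a ++ b) ls = prependHeadC a (prependHeadC b ls) := by
  cases ls <;> simp [prependHeadC]

lemma prependHeadC_nil (ls : List (List Char)) (h : ls ≠ []) :
    prependHeadC [] ls = ls := by
  cases ls with
  | nil => exact absurd rfl h
  | cons l ls => simp [prependHeadC]

-- characterisation of PySem's fuel-based splitOn.go for the single-char separator '\n'
lemma splitOn_go_linesC (fuel : Nat) : ∀ (l cur : List Char) (accs : List (List Char)),
    l.length ≤ fuel →
    PySem.Chars.splitOn.go ['\n'] fuel l cur accs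
      = accs.reverse ++ prependHeadC cur.reverse (linesC l) := by
  induction fuel with
  | zero =>
      intro l cur accs hl
      have : l = [] := List.length_eq_zero_iff.mp (Nat.le_zero.mp hl)
      subst this
      simp [PySem.Chars.splitOn.go, linesC, prependHeadC]
  | succ fuel ih =>
      intro l cur accs hl
      cases l with
      | nil => simp [PySem.Chars.splitOn.go, linesC, prependHeadC]
      | cons c rest =>
          simp only [PySem.Chars.splitOn.go]
          by_cases hc : c = '\n'
          · subst hc
            have hpre : List.isPrefixOf ['\n'] ('\n' :: rest) = true := by
              simp [List.isPrefixOf]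
            rw [if_pos hpre]
            have : List.drop (List.length ['\n']) ('\n' :: rest) = rest := by simp
            rw [this, ih rest [] (cur.reverse :: accs) (by simpa using Nat.le_of_succ_le_succ hl)]
            simp only [List.reverse_nil]
            rw [prependHeadC_nil _ (linesC_ne_nil rest)]
            simp [linesC, prependHeadC]
          · have hpre : List.isPrefixOf ['\n'] (c :: rest) = false := by
              simp [List.isPrefixOf]
              exact fun h => hc h.symm
            rw [if_neg (by simp [hpre])]
            rw [ih rest (c :: cur) accs (by simpa using Nat.le_of_succ_le_succ hl)]
            have : (c :: cur).reverse = cur.reverse ++ [c] := by simp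
            rw [this, prependHeadC_append]
            simp [linesC, hc]

lemma splitOn_eq_linesC (l : List Char) :
    PySem.Chars.splitOn l ['\n'] = linesC l := by
  unfold PySem.Chars.splitOn
  rw [splitOn_go_linesC (l.length + 1) l [] [] (Nat.le_succ _)]
  simp [prependHeadC_nil _ (linesC_ne_nil l)]

lemma split_rucksacks_eq (s : String) :
    split_rucksacks s = (linesC s.toList).map String.ofList := by
  unfold split_rucksacks
  rw [PySem.Str.split?.eq_1]
  have : PySem.Chars.split? s.toList "\n".toList
      = some (PySem.Chars.splitOn s.toList ['\n']) := by
    simp [PySem.Chars.split?]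
  rw [this]
  simp [splitOn_eq_linesC]

-- B's invariant: bGo computes exactly out ++ consume group (remaining lines)
def prependHeadS (p : List Char) : List String → List String
  | [] => [String.ofList p]
  | l :: ls => String.ofList (p ++ l.toList) :: ls

lemma prependHeadS_map (p : List Char) (ls : List (List Char)) :
    prependHeadS p (ls.map String.ofList) = (prependHeadC p ls).map String.ofList := by
  cases ls with
  | nil => simp [prependHeadS, prependHeadC]
  | cons l ls => simp [prependHeadS, prependHeadC]

lemma prependHeadS_nil (ls : List String) (h : ls ≠ []) : prependHeadS [] ls = ls := by
  cases ls with
  | nil => exact absurd rfl h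
  | cons l ls => simp [prependHeadS]

lemma bGo_consume : ∀ (cs : List Char) (outp : List (List String)) (group : List String)
    (line : List Char),
    bGo cs outp group line = outp ++ consume group (prependHeadS line ((linesC cs).map String.ofList)) := by
  intro cs
  induction cs with
  | nil =>
      intro outp group line
      simp [bGo, linesC, prependHeadS, consume]
      split <;> simp
  | cons c cs ih =>
      intro outp group line
      by_cases hc : c = '\n'
      · subst hc
        simp only [bGo, if_pos (by simp : ('\n' == '\n') = true)]
        have hmapne : (linesC cs).map String.ofList ≠ [] := by
          simpa using linesC_ne_nil cs
        have hl : linesC ('\n' :: cs) = [] :: linesC cs := by simp [linesC]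
        have hp : prependHeadS line ((linesC ('\n' :: cs)).map String.ofList)
            = String.ofList line :: (linesC cs).map String.ofList := by
          rw [hl]; simp [prependHeadS]
        split
        · rename_i h3
          rw [ih, prependHeadS_nil _ hmapne, hp]
          simp [consume]
          intro h; simp at h3; omega
        · rename_i h3
          rw [ih, prependHeadS_nil _ hmapne, hp]
          simp [consume]
          intro h; simp at h3; omega
      · simp only [bGo, if_neg (by simp [hc] : ¬ ((c == '\n') = true))]
        rw [ih]
        have : prependHeadS (line ++ [c]) ((linesC cs).map String.ofList)
            = prependHeadS line (prependHeadS [c] ((linesC cs).map String.ofList)) := by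
          cases h : (linesC cs).map String.ofList with
          | nil => simp [prependHeadS]
          | cons l ls => simp [prependHeadS]
        rw [this]
        congr 1
        congr 1
        simp only [linesC, if_neg hc]
        rw [prependHeadS_map, prependHeadS_map]

-- A's grouping equals B's grouping on any finished line list
lemma consume_eq_zip3Chunks (xs : List String) : consume [] xs = zip3Chunks xs := by
  induction xs using zip3Chunks.induct with
  | case1 a b c rest ih => simp [consume, zip3Chunks, ih]
  | case2 xs h =>
      rcases xs with _ | ⟨a, _ | ⟨b, _ | ⟨c, r⟩⟩⟩
      · simp [consume, zip3Chunks]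
      · simp [consume, zip3Chunks]
      · simp [consume, zip3Chunks]
      · exact absurd rfl (h a b c r · )

-- A's loop body as a map over Nat indices
lemma range_map_eq_zip3Chunks (xs : List String) :
    (List.range (xs.length / 3)).map
      (fun k => [xs.getD (k * 3) "", xs.getD (k * 3 + 1) "", xs.getD (k * 3 + 2) ""])
      = zip3Chunks xs := by
  induction xs using zip3Chunks.induct with
  | case1 a b c rest ih =>
      have hlen : (a :: b :: c :: rest).length / 3 = rest.length / 3 + 1 := by
        simp [List.length_cons]; omega
      rw [hlen, List.range_succ_eq_map, List.map_cons, List.map_map]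
      refine congrArg₂ _ (by simp) ?_
      rw [← ih]
      refine List.map_congr_left fun k _ => ?_
      have h1 : Nat.succ k * 3 = (k * 3) + 1 + 1 + 1 := by omega
      simp only [Function.comp_apply, h1, List.getD_cons_succ]
  | case2 xs h =>
      rcases xs with _ | ⟨a, _ | ⟨b, _ | ⟨c, r⟩⟩⟩
      · simp [zip3Chunks]
      · simp [zip3Chunks]
      · simp [zip3Chunks]
      · exact absurd rfl (h a b c r · )

lemma loop_eq_zip3Chunks (xs : List String) :
    (PySem.List.pyRange 0 (PySem.Int.floordiv (xs.length : Int) 3) 1).foldl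
      (fun outp i =>
        outp ++ [[PySem.List.pyGetD xs (i * 3) "",
                  PySem.List.pyGetD xs (i * 3 + 1) "",
                  PySem.List.pyGetD xs (i * 3 + 2) ""]]) []
      = zip3Chunks xs := by
  rw [PySem.List.foldl_append_singleton_eq_map]
  have hdiv : PySem.Int.floordiv (xs.length : Int) 3 = ((xs.length / 3 : Nat) : Int) := by
    exact_mod_cast PySem.Int.floordiv_natCast xs.length 3
  rw [hdiv, PySem.List.pyRange_zero_nat, List.map_map]
  rw [← range_map_eq_zip3Chunks xs]
  refine List.map_congr_left fun k _ => ?_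
  have e1 : ((k : Int) * 3) = ((k * 3 : Nat) : Int) := by push_cast; ring
  have e2 : (((k * 3 : Nat) : Int) + 1) = ((k * 3 + 1 : Nat) : Int) := by push_cast; ring
  have e3 : (((k * 3 : Nat) : Int) + 2) = ((k * 3 + 2 : Nat) : Int) := by push_cast; ring
  simp only [Function.comp_apply]
  rw [e1, e2, e3, PySem.List.pyGetD_natCast, PySem.List.pyGetD_natCast, PySem.List.pyGetD_natCast]

-- ===== VERDICT (by name: the statement is the Claim_ definition above) =====
theorem split_groups_spec : Claim_equal_split_groups := by
  intro s _
  unfold Spec_split_groups split_groups split_groups_alt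
  rw [loop_eq_zip3Chunks, bGo_consume, split_rucksacks_eq]
  rw [← consume_eq_zip3Chunks]
  rw [prependHeadS_nil _ (by simpa using linesC_ne_nil s.toList)]
  simp
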